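/- GENERATED by tools/from_farm_form.py from prooffarm-gif/accepted/DGifGetImageDesc.6/Lemmas.lean (a worked proof of the farm's unit `DGifGetImageDesc.6`,
   accepted by the verdict) — do not edit. -/
import Gif.Spec.AllSegs

/-
  THE PURE LEMMAS OF UNIT `DGifGetImageDesc.6` (109583H … 1095D1H; dgif_lib.c:472-476): what the three NULL stores into the
  uncounted slot and `ImageCount++` do to the state invariant, to the heap's invariant, to `LZOK` and to the reader's measure.
  No machine state here: the footprint of the segment is a hypothesis `Mem.SameExcept [stack, slot + 32 … slot + 56, gif + 32 … gif + 36]`.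
-/
namespace Gif.Spec.DGifGetImageDesc_6
open X86 X86.User Asan ProgX.Base ProgX.Base.Spec Gif.Spec

/-- The SavedImages array is an object of the forest. -/
theorem seg6_arr_owned {Fc : Forest} {s : Saved} (hsaved : Fc.saved = some s) : (s.arr, 56 * s.cap) ∈ Fc.owned := by
  apply Forest.mem_owned_saved
  rw [hsaved]
  exact List.mem_cons_self

/-- gif and the SavedImages array are two objects of the forest: at least 64 bytes apart [FO1 FO2]. -/
theorem seg6_far_gif {Hc : Heap} {Fc : Forest} {R : Rd} {mem : Mem} {s : Saved} (hok : GifOK Hc Fc R mem) (hheap : HeapOK Hc mem)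
    (hsaved : Fc.saved = some s) : Fc.gif + 120 + 64 ≤ s.arr ∨ s.arr + 56 * s.cap + 64 ≤ Fc.gif := by
  have hne : ((Fc.gif, 120) : Nat × Nat) ≠ (s.arr, 56 * s.cap) := by
    intro h
    have h2 : 120 = 56 * s.cap := congrArg Prod.snd h
    omega
  have hfar := hok.owns.far hheap (a := (Fc.gif, 120)) (b := (s.arr, 56 * s.cap)) List.mem_cons_self (seg6_arr_owned hsaved) hne
  simp only at hfar
  exact hfar

/-- pv and the SavedImages array are two objects of the forest: at least 64 bytes apart [FO1 FO2]. -/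
theorem seg6_far_pv {Hc : Heap} {Fc : Forest} {R : Rd} {mem : Mem} {s : Saved} (hok : GifOK Hc Fc R mem) (hheap : HeapOK Hc mem)
    (hsaved : Fc.saved = some s) : Fc.pv + 24936 + 64 ≤ s.arr ∨ s.arr + 56 * s.cap + 64 ≤ Fc.pv := by
  have hne : ((Fc.pv, 24936) : Nat × Nat) ≠ (s.arr, 56 * s.cap) := by
    intro h
    have h2 : 24936 = 56 * s.cap := congrArg Prod.snd h
    omega
  have hfar := hok.owns.far hheap (a := (Fc.pv, 24936)) (b := (s.arr, 56 * s.cap))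
    (List.mem_cons_of_mem _ List.mem_cons_self) (seg6_arr_owned hsaved) hne
  simp only at hfar
  exact hfar

/-- gif and pv are two objects of the forest: at least 64 bytes apart [FO1 FO2]. -/
theorem seg6_far_gif_pv {Hc : Heap} {Fc : Forest} {R : Rd} {mem : Mem} (hok : GifOK Hc Fc R mem) (hheap : HeapOK Hc mem) :
    Fc.gif + 120 + 64 ≤ Fc.pv ∨ Fc.pv + 24936 + 64 ≤ Fc.gif := by
  have hne : ((Fc.gif, 120) : Nat × Nat) ≠ (Fc.pv, 24936) := by
    intro h
    have h2 : 120 = 24936 := congrArg Prod.snd h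
    omega
  have hfar := hok.owns.far hheap (a := (Fc.gif, 120)) (b := (Fc.pv, 24936)) List.mem_cons_self
    (List.mem_cons_of_mem _ List.mem_cons_self) hne
  simp only at hfar
  exact hfar

/-- **What is owned once the slot is counted** (l.476): the forest with one more image `⟨cm, none, none⟩` owns the copy of the local
colour map besides what the old forest owns (`Saved.objs_snoc`, `Forest.owned_saved`). -/
theorem seg6_owns {Hc : Heap} {Fc : Forest} {s : Saved} {cm : Option Map} (hsaved : Fc.saved = some s)
    (hown : Owns Hc (Map.objs cm ++ Fc.owned)) :
    Owns Hc ({ Fc with saved := some { s with imgs := s.imgs ++ [⟨cm, none, none⟩] } } : Forest).owned := by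
  apply hown.perm
  -- the new forest's objects: those of its array in front
  have p1 := Forest.owned_saved ({ Fc with saved := some { s with imgs := s.imgs ++ [⟨cm, none, none⟩] } } : Forest)
  rw [Forest.ownedButSaved_set] at p1
  -- the array's objects: those of the new image in front
  have p2 := Saved.objs_snoc s.arr s.cap s.imgs ⟨cm, none, none⟩
  have e1 : Img.objs ⟨cm, none, none⟩ = Map.objs cm := by
    simp only [Img.objs, rasterObjs, Exts.objs, List.append_nil]
  rw [e1] at p2
  -- the old forest's objects: those of its array in front
  have p3 := Forest.owned_saved Fc
  rw [hsaved] at p3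
  have p4 : (Map.objs cm ++ Fc.owned).Perm (Map.objs cm ++ (Saved.objs (some s) ++ Fc.ownedButSaved)) := p3.append_left _
  refine p4.trans ?_
  rw [← List.append_assoc]
  exact (p1.trans (p2.append_right _)).symm

/-- **THE STATE INVARIANT ONCE THE SLOT IS COUNTED** (l.472-476): the memory changed in a stack window below the cursor, in the
slot's last three fields (`[sp + 32, sp + 56)`: a tail window of the array) and in `gif.ImageCount`; the three fields read 0 and
the count is one more: `Shape.set_saved` with `SavedAt.snoc`, `ImgAt` of the new slot from `MapAt cm` (framed: the copy's object is
no object of the forest) and the three zeros. -/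
theorem seg6_gifok {Hc : Heap} {Fc : Forest} {R : Rd} {mem mem' : Mem} {s : Saved} {cm : Option Map} {lo hi : Nat}
    (hok : GifOK Hc Fc R mem) (hheap : HeapOK Hc mem) (hbase : Hc.base = 0x800000)
    (hcur : 0x700000 ≤ R.cur ∧ R.cur + 16 ≤ 0x800000)
    (hsaved : Fc.saved = some s) (hroom : s.imgs.length + 1 ≤ s.cap)
    (hmap : MapAt cm (SavedImage.ImageDesc.ColorMap mem (s.arr + 56 * s.imgs.length)) mem)
    (hown : Owns Hc (Map.objs cm ++ Fc.owned))
    (hlo : 0x700000 ≤ lo) (hhi : hi ≤ R.cur)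
    (hs : Mem.SameExcept [⟨lo, hi⟩, ⟨s.arr + 56 * s.imgs.length + 32, s.arr + 56 * s.imgs.length + 56⟩,
      ⟨Fc.gif + 32, Fc.gif + 36⟩] mem mem')
    (hr : SavedImage.RasterBits mem' (s.arr + 56 * s.imgs.length) = 0)
    (hc : SavedImage.ExtensionBlockCount mem' (s.arr + 56 * s.imgs.length) = 0)
    (hb : SavedImage.ExtensionBlocks mem' (s.arr + 56 * s.imgs.length) = 0)
    (hcnt : GifFileType.ImageCount mem' Fc.gif = GifFileType.ImageCount mem Fc.gif + 1) :
    GifOK Hc { Fc with saved := some { s with imgs := s.imgs ++ [⟨cm, none, none⟩] } } R mem' := by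
  refine ⟨seg6_owns hsaved hown, ?_⟩
  have hpl := hok.owns.placed hheap
  have G := carry_Geo.intro hok.shape hpl hheap hcur
  -- where gif and the array are
  have hgin := hok.owns.inside hheap (o := (Fc.gif, 120)) List.mem_cons_self
  have hain := hok.owns.inside hheap (o := (s.arr, 56 * s.cap)) (seg6_arr_owned hsaved)
  simp only at hgin hain
  rw [hbase] at hgin hain
  have hg1 := hgin.1
  have hg2 := hgin.2.2.2.2
  have ha1 := hain.1
  have ha2 := hain.2.2.2.2
  clear hgin hain
  have hfar := seg6_far_gif hok hheap hsaved
  -- the three windows: two loose ones and the count field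
  have hl1 : Loose Hc Fc R ⟨lo, hi⟩ :=
    Loose.stack hheap (by simp only; omega) (by simp only; omega) (by simp only; omega)
  have hl2 : Loose Hc Fc R ⟨s.arr + 56 * s.imgs.length + 32, s.arr + 56 * s.imgs.length + 56⟩ :=
    (Loose.savedTail hheap hok.owns hsaved (by simp only; omega) (by simp only; omega)).1
  -- what the windows miss: every structural window of the forest
  have hmiss : ∀ o, o ∈ Fc.structs → ∀ w, w ∈ [(⟨lo, hi⟩ : Span),
      ⟨s.arr + 56 * s.imgs.length + 32, s.arr + 56 * s.imgs.length + 56⟩, ⟨Fc.gif + 32, Fc.gif + 36⟩] →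
      o.1 + o.2 ≤ w.lo ∨ w.hi ≤ o.1 := by
    intro o ho w hw
    simp only [List.mem_cons, List.mem_nil_iff, or_false] at hw
    obtain ⟨x, hx, ex, hcx⟩ := G.structObj o ho
    have hxr := hheap.obj_range hx
    rw [hbase] at hxr
    rcases hw with rfl | rfl | rfl
    · simp only
      omega
    · -- the tail window: behind the counted slots of the array, far from every other structural object
      have hoff := carry_Off.of_loose (kScm := True) (kIcm := True) (kSav := True) (kPend := True) (kCur := True) G hl2
      unfold Forest.structs at ho
      simp only [List.mem_append] at ho
      rcases ho with ((h1 | h2) | h3) | h4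
      · have := hoff.scmS trivial o h1
        simp only at this ⊢
        omega
      · have := hoff.icmS trivial o h2
        simp only at this ⊢
        omega
      · have := hoff.savS trivial o h3
        simp only at this ⊢
        omega
      · have := hoff.pendS trivial o h4
        simp only at this ⊢
        omega
    · -- the count field: inside gif, which is no structural object
      obtain ⟨y, hy, ey, hcy⟩ := G.gifObj
      have hin := (G.in_obj hy (w := ⟨Fc.gif + 32, Fc.gif + 36⟩) (by simp only; omega) (by simp only; omega)).2.2.1 o ho (by
        rw [ey]
        exact (G.struct_ne o ho).1)
      simp only at hin ⊢
      omega
  have hslt : ∀ o, o ∈ Fc.structs → o.1 + o.2 < 2 ^ 64 := by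
    intro o ho
    obtain ⟨x, hx, ex, hcx⟩ := G.structObj o ho
    have := G.inData x hx
    omega
  have hkeep : ∀ o, o ∈ Fc.structs → Mem.EqOn o.1 (o.1 + o.2) mem mem' := by
    intro o ho
    apply hs.eqOn
    intro w hw
    exact hmiss o ho w hw
  -- the SavedImages pointer of gif is kept
  have hsi : GifFileType.SavedImages mem' Fc.gif = GifFileType.SavedImages mem Fc.gif := by
    simp only [gfield]
    apply Mem.EqOn.rd (lo := Fc.gif + 72) (hi := Fc.gif + 80) _ _ _ (Nat.le_refl _) (Nat.le_refl _) (by omega)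
    apply hs.eqOn
    intro w hw
    simp only [List.mem_cons, List.mem_nil_iff, or_false] at hw
    rcases hw with rfl | rfl | rfl
    · simp only
      omega
    · simp only
      omega
    · simp only
      omega
  -- the slot's colour-map field is kept
  have hcmf : SavedImage.ImageDesc.ColorMap mem' (s.arr + 56 * s.imgs.length) =
      SavedImage.ImageDesc.ColorMap mem (s.arr + 56 * s.imgs.length) := by
    simp only [gfield]
    apply Mem.EqOn.rd (lo := s.arr + 56 * s.imgs.length + 24) (hi := s.arr + 56 * s.imgs.length + 32) _ _ _ (Nat.le_refl _)
      (Nat.le_refl _) (by omega)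
    apply hs.eqOn
    intro w hw
    simp only [List.mem_cons, List.mem_nil_iff, or_false] at hw
    rcases hw with rfl | rfl | rfl
    · simp only
      omega
    · simp only
      omega
    · simp only
      omega
  -- the new slot agrees with ⟨cm, none, none⟩
  have himg : ImgAt (s.arr + 56 * s.imgs.length) ⟨cm, none, none⟩ mem' := by
    refine ⟨?_, hr, ⟨hb, hc⟩⟩
    show MapAt cm (SavedImage.ImageDesc.ColorMap mem' (s.arr + 56 * s.imgs.length)) mem'
    rw [hcmf]
    cases cm with
    | none => exact hmap
    | some m =>
      -- the copy's `ColorMapObject` is live and is neither gif nor the array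
      have hmin : (m.obj, 24) ∈ Map.objs (some m) ++ Fc.owned := by
        apply List.mem_append_left
        simp only [Map.objs, List.mem_cons, true_or]
      have hmi := hown.inside hheap hmin
      simp only at hmi
      rw [hbase] at hmi
      have hm1 := hmi.1
      have hm2 := hmi.2.2.2.2
      clear hmi
      have hne1 : ((m.obj, 24) : Nat × Nat) ≠ (Fc.gif, 120) := by
        intro h
        have h2 : 24 = 120 := congrArg Prod.snd h
        omega
      have hne2 : ((m.obj, 24) : Nat × Nat) ≠ (s.arr, 56 * s.cap) := by
        intro h
        have h2 : 24 = 56 * s.cap := congrArg Prod.snd h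
        omega
      have hf1 := hown.far hheap hmin (List.mem_append_right _ (List.mem_cons_self (a := (Fc.gif, 120)))) hne1
      have hf2 := hown.far hheap hmin (List.mem_append_right _ (seg6_arr_owned hsaved)) hne2
      simp only at hf1 hf2
      apply hmap.frame
      · intro o ho
        simp only [Map.structs, List.mem_singleton] at ho
        subst ho
        apply hs.eqOn
        intro w hw
        simp only [List.mem_cons, List.mem_nil_iff, or_false] at hw
        rcases hw with rfl | rfl | rfl
        · simp only
          omega
        · simp only
          omega
        · simp only
          omega
      · intro x hx
        have e : x = m := (Option.some.inj hx).symm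
        subst e
        omega
  -- the array with one more counted slot
  have h0 := hok.shape.saved
  rw [hsaved] at h0
  have h1 := SavedAt.snoc (g := ⟨cm, none, none⟩) h0 (fun o ho => hkeep o (carry_mem_structs_saved (by rw [hsaved]; exact ho)))
    (fun o ho => hslt o (carry_mem_structs_saved (by rw [hsaved]; exact ho))) hroom himg
  rw [← hsi, ← hcnt] at h1
  -- the step of the shape
  refine hok.shape.set_saved hpl hheap hcur hs ?_ _ h1
  intro w hw
  simp only [List.mem_cons, List.mem_nil_iff, or_false] at hw
  rcases hw with rfl | rfl | rfl
  · exact Or.inl hl1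
  · exact Or.inl hl2
  · exact Or.inr (Or.inr (Or.inl ⟨Nat.le_refl _, Nat.le_refl _⟩))

/-- **The heap's invariant through the segment's footprint**: a stack window below the heap's region, a window inside the array's
object, a window inside gif (`HeapInv.sameExcept`). -/
theorem seg6_heapinv {Hc : Heap} {rest : List Obj} {frames : List (Nat × FrameLayout)} {top : Nat} {Fc : Forest} {R : Rd}
    {mem mem' : Mem} {s : Saved} {lo hi : Nat}
    (hinv : HeapInv Hc rest frames top mem) (hok : GifOK Hc Fc R mem) (hbase : Hc.base = 0x800000)
    (hsaved : Fc.saved = some s) (hroom : s.imgs.length + 1 ≤ s.cap) (hun : ShadowUntouched mem mem') (hhi : hi ≤ 0x800000)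
    (hs : Mem.SameExcept [⟨lo, hi⟩, ⟨s.arr + 56 * s.imgs.length + 32, s.arr + 56 * s.imgs.length + 56⟩,
      ⟨Fc.gif + 32, Fc.gif + 36⟩] mem mem') :
    HeapInv Hc rest frames top mem' := by
  refine hinv.sameExcept hun hs ?_
  intro w hw
  simp only [List.mem_cons, List.mem_nil_iff, or_false] at hw
  rcases hw with rfl | rfl | rfl
  · -- the stack window lies below the heap's region
    left
    left
    rw [hbase]
    exact hhi
  · -- the slot's fields lie inside the array's object
    exact (Loose.savedTail (R := R) hinv.heap hok.owns hsaved (by simp only; omega) (by simp only; omega)).2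
  · -- the count lies inside gif
    exact HeapWin.gif hinv.heap hok.owns (by simp only; omega) (by simp only; omega)

/-- **The LZW field ranges through the segment's footprint**: no window meets `[pv + 8, pv + 48)` (pv is a heap object, 64 bytes
from gif and from the array). -/
theorem seg6_lzok {Hc : Heap} {Fc : Forest} {R : Rd} {mem mem' : Mem} {s : Saved} {lo hi : Nat}
    (hlz : LZOK mem Fc.pv) (hok : GifOK Hc Fc R mem) (hheap : HeapOK Hc mem) (hbase : Hc.base = 0x800000)
    (hsaved : Fc.saved = some s) (hroom : s.imgs.length + 1 ≤ s.cap) (hhi : hi ≤ 0x800000)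
    (hs : Mem.SameExcept [⟨lo, hi⟩, ⟨s.arr + 56 * s.imgs.length + 32, s.arr + 56 * s.imgs.length + 56⟩,
      ⟨Fc.gif + 32, Fc.gif + 36⟩] mem mem') :
    LZOK mem' Fc.pv := by
  have hpin := hok.owns.inside hheap (o := (Fc.pv, 24936)) (List.mem_cons_of_mem _ List.mem_cons_self)
  simp only at hpin
  rw [hbase] at hpin
  have hp1 := hpin.1
  have hp2 := hpin.2.2.2.2
  clear hpin
  have hf1 := seg6_far_pv hok hheap hsaved
  have hf2 := seg6_far_gif_pv hok hheap
  apply hlz.sameExcept hs (by omega)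
  intro w hw
  simp only [List.mem_cons, List.mem_nil_iff, or_false] at hw
  rcases hw with rfl | rfl | rfl
  · simp only
    omega
  · simp only
    omega
  · simp only
    omega

/-- **The reader's measure through the segment's footprint**: the stack window ends at or below the cursor, the other two lie in
the heap's region, above the stack. -/
theorem seg6_rem {Hc : Heap} {Fc : Forest} {R : Rd} {mem mem' : Mem} {s : Saved} {lo hi : Nat}
    (hok : GifOK Hc Fc R mem) (hheap : HeapOK Hc mem) (hbase : Hc.base = 0x800000)
    (hcur : 0x700000 ≤ R.cur ∧ R.cur + 16 ≤ 0x800000) (hsaved : Fc.saved = some s) (hhi : hi ≤ R.cur)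
    (hs : Mem.SameExcept [⟨lo, hi⟩, ⟨s.arr + 56 * s.imgs.length + 32, s.arr + 56 * s.imgs.length + 56⟩,
      ⟨Fc.gif + 32, Fc.gif + 36⟩] mem mem') :
    rem R mem' = rem R mem := by
  have hgin := hok.owns.inside hheap (o := (Fc.gif, 120)) List.mem_cons_self
  have hain := hok.owns.inside hheap (o := (s.arr, 56 * s.cap)) (seg6_arr_owned hsaved)
  simp only at hgin hain
  rw [hbase] at hgin hain
  have hg1 := hgin.1
  have ha1 := hain.1
  clear hgin hain
  apply rem_sameExcept hs (by omega)
  intro w hw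
  simp only [List.mem_cons, List.mem_nil_iff, or_false] at hw
  rcases hw with rfl | rfl | rfl
  · simp only
    omega
  · simp only
    omega
  · simp only
    omega

/-- `ImageCount + 1` as the machine computes it (`add eax, 1` on the loaded dword): no wrap, the count is below `2^31`. -/
theorem seg6_inc (n : Nat) (h : n + 1 < 2 ^ 31) : (BitVec.ofNat 32 n + 1#32).toNat = n + 1 := by
  rw [BitVec.toNat_add, BitVec.toNat_ofNat]
  have e1 : (1#32).toNat = 1 := by decide
  rw [e1]
  omega

end Gif.Spec.DGifGetImageDesc_6
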